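-- pv_equiv track=rewrite | github.com/victorjgomez/python_competitive_programming_problems | problems/6_hash_table/codeforces/1_problem#B519.py | solution
-- ===== SOURCE A (Python) =====
-- from collections import Counter
-- from typing import List
--
-- def solution(arr: List[int], brr: List[int], crr: List[int]) -> List[int]:
--     solution_set = []
--     dict_arr = Counter(arr)
--     dict_brr = Counter(brr)
--     dict_crr = Counter(crr)
--
--     for a in dict_arr.keys():
--         if dict_brr.get(a) is None:
--             solution_set.append(a)
--         elif dict_crr.get(a) is None:
--             solution_set.append(a)
--         elif dict_brr.get(a) < dict_arr.get(a):
--             solution_set.append(a)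
--         elif dict_crr.get(a) < dict_arr.get(a):
--             solution_set.append(a)
--
--     return solution_set
-- ===== SOURCE B (Python) =====
-- from typing import List
--
--
-- def solution(arr: List[int], brr: List[int], crr: List[int]) -> List[int]:
--     sa, sb, sc = sorted(arr), sorted(brr), sorted(crr)
--     out = []
--     seen = set()
--     for a in arr:
--         if a in seen:
--             continue
--         seen.add(a)
--         if _occurrences(sb, a) < _occurrences(sa, a) or _occurrences(sc, a) < _occurrences(sa, a):
--             out.append(a)
--     return out
--
--
-- def _bound(s, a, upper):
--     """First index i of sorted s with s[i] > a (upper=True) resp. s[i] >= a (upper=False)."""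
--     lo, hi = 0, len(s)
--     while lo < hi:
--         mid = (lo + hi) // 2
--         if s[mid] < a or (upper and s[mid] == a):
--             lo = mid + 1
--         else:
--             hi = mid
--     return lo
--
--
-- def _occurrences(s, a):
--     return _bound(s, a, True) - _bound(s, a, False)
-- ===== Notes on version B (the rewrite author's own statement) =====
-- stated objective: alternative
-- what changed: Replaces A's three hash Counters and per-key four-way elif chain by sorting each of the three lists once and, in a single seen-set pass over arr in order, counting each first occurrence in the three sorted lists with a hand-written binary search (upper bound minus lower bound).
import Mathlib
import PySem

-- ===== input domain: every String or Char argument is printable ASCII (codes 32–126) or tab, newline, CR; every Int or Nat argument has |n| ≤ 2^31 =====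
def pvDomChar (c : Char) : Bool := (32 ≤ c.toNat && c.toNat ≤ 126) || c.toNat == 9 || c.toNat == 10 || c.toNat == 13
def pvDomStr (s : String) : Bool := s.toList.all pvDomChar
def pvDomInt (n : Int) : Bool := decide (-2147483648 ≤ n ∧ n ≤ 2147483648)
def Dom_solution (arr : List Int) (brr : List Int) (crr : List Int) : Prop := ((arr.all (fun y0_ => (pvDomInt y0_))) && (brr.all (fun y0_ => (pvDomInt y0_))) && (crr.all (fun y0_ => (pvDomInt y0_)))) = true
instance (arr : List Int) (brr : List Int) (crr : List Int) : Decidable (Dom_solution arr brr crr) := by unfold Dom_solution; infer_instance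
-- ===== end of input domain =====

-- B replaces A's three hash Counters and per-key elif chain by sorting the three lists once and
-- counting each first occurrence of arr by hand-written binary search (objective: alternative).

-- ===== PORT A =====
def solution (arr : List Int) (brr : List Int) (crr : List Int) : List Int :=
  let dictArr := PySem.Dict.counter arr
  let dictBrr := PySem.Dict.counter brr
  let dictCrr := PySem.Dict.counter crr
  dictArr.keys.foldl (fun solutionSet a =>
    if dictBrr.get? a = none then solutionSet ++ [a]
    else if dictCrr.get? a = none then solutionSet ++ [a]
    else if (dictBrr.get? a).getD 0 < (dictArr.get? a).getD 0 then solutionSet ++ [a]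
    else if (dictCrr.get? a).getD 0 < (dictArr.get? a).getD 0 then solutionSet ++ [a]
    else solutionSet) []

-- ===== PORT B =====
-- the loop test 's[mid] < a or (upper and s[mid] == a)' of Source B's _bound
def pvBoundP (a : Int) (upper : Bool) (x : Int) : Bool := decide (x < a) || (upper && (x == a))

-- Source B's _bound while-loop; 'lo < hi ≤ len s' throughout, so 's.getD mid 0' is Python's s[mid]
-- (mid is always in range — exact here).
def pvBoundLoop (s : List Int) (a : Int) (upper : Bool) (lo hi : Nat) : Nat :=
  -- Python's 'mid = (lo + hi) // 2' is inlined
  if _h : lo < hi then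
    if pvBoundP a upper (s.getD ((lo + hi) / 2) 0) then pvBoundLoop s a upper ((lo + hi) / 2 + 1) hi
    else pvBoundLoop s a upper lo ((lo + hi) / 2)
  else lo
termination_by hi - lo
decreasing_by all_goals omega

def pvBound (s : List Int) (a : Int) (upper : Bool) : Nat := pvBoundLoop s a upper 0 s.length

def pvOccurrences (s : List Int) (a : Int) : Int :=
  (pvBound s a true : Int) - (pvBound s a false : Int)

def solution_alt (arr : List Int) (brr : List Int) (crr : List Int) : List Int :=
  let sa := PySem.List.sorted arr (fun x => x) false
  let sb := PySem.List.sorted brr (fun x => x) false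
  let sc := PySem.List.sorted crr (fun x => x) false
  (arr.foldl (fun (st : List Int × PySem.Set Int) a =>
      if PySem.Set.contains st.2 a then st
      else
        (if pvOccurrences sb a < pvOccurrences sa a || pvOccurrences sc a < pvOccurrences sa a
           then st.1 ++ [a] else st.1,
         PySem.Set.add st.2 a))
    ([], PySem.Set.empty)).1

-- ===== PRECONDITION & SPEC =====
def Spec_solution (arr : List Int) (brr : List Int) (crr : List Int) (out : List Int) : Prop := out = solution_alt arr brr crr
instance (arr : List Int) (brr : List Int) (crr : List Int) (out : List Int) : Decidable (Spec_solution arr brr crr out) := by unfold Spec_solution; infer_instance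

-- ===== CLAIM (what is proved, stated in full; the proofs are below) =====
def Claim_equal_solution : Prop := ∀ (arr : List Int) (brr : List Int) (crr : List Int), Dom_solution arr brr crr → Spec_solution arr brr crr (solution arr brr crr)

-- ===== LEMMAS AND PROOFS =====

-- pvBoundP is downward closed
lemma pvBoundP_mono (a : Int) (u : Bool) (x y : Int) (hxy : x ≤ y) (hy : pvBoundP a u y = true) :
    pvBoundP a u x = true := by
  simp only [pvBoundP, Bool.or_eq_true, Bool.and_eq_true, decide_eq_true_eq, beq_iff_eq] at *
  rcases hy with h | ⟨hu, h⟩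
  · left; omega
  · subst h
    rcases lt_or_eq_of_le hxy with h | h
    · left; exact h
    · right; exact ⟨hu, h⟩

-- boundary of a downward-closed predicate on a sorted list: p holds exactly below countP p
lemma sorted_boundary (s : List Int) (p : Int → Bool)
    (hs : s.Pairwise (· ≤ ·)) (hmono : ∀ x y, x ≤ y → p y = true → p x = true)
    (j : Nat) (hj : j < s.length) : (p s[j] = true) ↔ j < s.countP p := by
  have hsplit : s = s.takeWhile p ++ s.dropWhile p := (List.takeWhile_append_dropWhile).symm
  have htw : ∀ x ∈ s.takeWhile p, p x = true := fun x hx => List.mem_takeWhile_imp hx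
  have hdw : ∀ x ∈ s.dropWhile p, p x = false := by
    intro x hx
    by_contra hpx
    have hpx' : p x = true := by revert hpx; cases p x <;> simp
    cases hD : s.dropWhile p with
    | nil => rw [hD] at hx; simp at hx
    | cons hd tl =>
      have hne : s.dropWhile p ≠ [] := by rw [hD]; simp
      have hhd0 := List.head_dropWhile_not p hne
      have hhd : p hd = false := by simp [hD] at hhd0; simpa using hhd0
      have hpair : (s.dropWhile p).Pairwise (· ≤ ·) := hs.sublist (List.dropWhile_sublist p)
      rw [hD] at hx hpair
      rcases List.mem_cons.mp hx with rfl | hx'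
      · rw [hhd] at hpx'; exact absurd hpx' (by simp)
      · have hle : hd ≤ x := (List.pairwise_cons.mp hpair).1 x hx'
        have := hmono hd x hle hpx'
        rw [hhd] at this; exact absurd this (by simp)
  have hcount : s.countP p = (s.takeWhile p).length := by
    conv_lhs => rw [hsplit]
    rw [List.countP_append, List.countP_eq_length.mpr htw,
      List.countP_eq_zero.mpr (by intro x hx; simpa using hdw x hx)]
    omega
  constructor
  · intro hpj
    by_contra hlt
    have hge : (s.takeWhile p).length ≤ j := by omega
    have hmem : s[j] ∈ s.dropWhile p := by
      rw [List.getElem_of_eq hsplit hj, List.getElem_append_right hge]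
      exact List.getElem_mem _
    have := hdw _ hmem
    rw [hpj] at this; exact absurd this (by simp)
  · intro hlt
    have hlt' : j < (s.takeWhile p).length := by omega
    rw [List.getElem_of_eq hsplit hj, List.getElem_append_left hlt']
    exact htw _ (List.getElem_mem _)

-- the binary-search loop finds the boundary
lemma pvBoundLoop_eq (s : List Int) (a : Int) (u : Bool)
    (hs : s.Pairwise (· ≤ ·)) :
    ∀ lo hi, lo ≤ hi → hi ≤ s.length → lo ≤ s.countP (pvBoundP a u) →
      s.countP (pvBoundP a u) ≤ hi → pvBoundLoop s a u lo hi = s.countP (pvBoundP a u) := by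
  intro lo hi
  induction hlh : hi - lo using Nat.strong_induction_on generalizing lo hi with
  | _ n ih =>
  intro hle hlen hloK hKhi
  rw [pvBoundLoop]
  by_cases h : lo < hi
  · rw [dif_pos h]
    have hmid1 : lo ≤ (lo + hi) / 2 := by omega
    have hmid2 : (lo + hi) / 2 < hi := by omega
    have hmidlen : (lo + hi) / 2 < s.length := by omega
    have hget : s.getD ((lo + hi) / 2) 0 = s[(lo + hi) / 2] := List.getD_eq_getElem s 0 hmidlen
    rw [hget]
    by_cases hp : pvBoundP a u s[(lo + hi) / 2] = true
    · have hK : (lo + hi) / 2 < s.countP (pvBoundP a u) :=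
        (sorted_boundary s _ hs (pvBoundP_mono a u) _ hmidlen).mp hp
      rw [if_pos hp]
      exact ih (hi - ((lo + hi) / 2 + 1)) (by omega) _ _ rfl (by omega) hlen (by omega) hKhi
    · have hK : ¬ ((lo + hi) / 2 < s.countP (pvBoundP a u)) := fun hc =>
        hp ((sorted_boundary s _ hs (pvBoundP_mono a u) _ hmidlen).mpr hc)
      rw [if_neg hp]
      exact ih ((lo + hi) / 2 - lo) (by omega) _ _ rfl (by omega) (by omega) hloK (by omega)
  · rw [dif_neg h]
    omega

lemma pvBound_eq (s : List Int) (a : Int) (u : Bool) (hs : s.Pairwise (· ≤ ·)) :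
    pvBound s a u = s.countP (pvBoundP a u) := by
  unfold pvBound
  exact pvBoundLoop_eq s a u hs 0 s.length (Nat.zero_le _) le_rfl (Nat.zero_le _)
    List.countP_le_length

lemma pvBoundP_true_eq (a x : Int) : pvBoundP a true x = decide (x ≤ a) := by
  simp only [pvBoundP]
  rw [Bool.eq_iff_iff]
  simp
  omega

lemma pvBoundP_false_eq (a x : Int) : pvBoundP a false x = decide (x < a) := by
  simp only [pvBoundP]
  rw [Bool.eq_iff_iff]
  simp

lemma countP_le_sub (s : List Int) (a : Int) :
    s.countP (pvBoundP a true) = s.countP (pvBoundP a false) + s.count a := by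
  induction s with
  | nil => simp
  | cons x t ih =>
    simp only [List.countP_cons, List.count_cons, ih, pvBoundP_true_eq, pvBoundP_false_eq]
    rcases lt_trichotomy x a with h | h | h
    · have d1 : decide (x ≤ a) = true := by simp; omega
      have d2 : decide (x < a) = true := by simp [h]
      have d3 : (x == a) = false := by simp; omega
      rw [d1, d2, d3]
      simp
      omega
    · subst h
      have d1 : decide (x ≤ x) = true := by simp
      have d2 : decide (x < x) = false := by simp
      have d3 : (x == x) = true := by simp
      rw [d1, d2, d3]
      simp
      omega
    · have d1 : decide (x ≤ a) = false := by simp; omega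
      have d2 : decide (x < a) = false := by simp; omega
      have d3 : (x == a) = false := by simp; omega
      rw [d1, d2, d3]
      simp

-- counting a value in sorted(xs) by the two binary searches = xs.count
lemma pvOccurrences_sorted (xs : List Int) (a : Int) :
    pvOccurrences (PySem.List.sorted xs (fun x => x) false) a = (xs.count a : Int) := by
  have hs : (PySem.List.sorted xs (fun x => x) false).Pairwise (· ≤ ·) := by
    have := PySem.List.sorted_pairwise (xs := xs) (key := fun x => x)
    simpa using this
  have hperm : (PySem.List.sorted xs (fun x => x) false).Perm xs := PySem.List.sorted_perm ..
  unfold pvOccurrences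
  rw [pvBound_eq _ _ _ hs, pvBound_eq _ _ _ hs, countP_le_sub, hperm.count_eq]
  push_cast
  ring

-- B's seen-set loop appends exactly the new distinct elements passing the test, in order
lemma foldl_seen_filter (cond : Int → Bool) (l : List Int) :
    ∀ (out : List Int) (seen : PySem.Set Int),
      (l.foldl (fun (st : List Int × PySem.Set Int) a =>
          if PySem.Set.contains st.2 a then st
          else (if cond a then st.1 ++ [a] else st.1, PySem.Set.add st.2 a)) (out, seen))
        = (out ++ ((PySem.Set.update seen l).drop seen.length).filter cond,
           PySem.Set.update seen l) := by
  induction l with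
  | nil =>
    intro out seen
    simp [PySem.Set.update, List.drop_length]
  | cons x l ih =>
    intro out seen
    by_cases hc : PySem.Set.contains seen x = true
    · have hx : x ∈ seen := by simpa [PySem.Set.contains_iff] using hc
      have hupd : PySem.Set.update seen (x :: l) = PySem.Set.update seen l := by
        simp [PySem.Set.update, PySem.Set.add, hx]
      simp only [List.foldl_cons, if_pos hc, hupd]
      exact ih out seen
    · have hx : x ∉ seen := by simpa [PySem.Set.contains_iff] using hc
      have hadd : PySem.Set.add seen x = seen ++ [x] := by simp [PySem.Set.add, hx]
      have hupd : PySem.Set.update seen (x :: l) = PySem.Set.update (seen ++ [x]) l := by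
        simp [PySem.Set.update, hadd]
      simp only [List.foldl_cons, if_neg hc, hupd]
      rw [ih]
      obtain ⟨r, hr⟩ : ∃ r, PySem.Set.update (seen ++ [x]) l = (seen ++ [x]) ++ r :=
        ⟨_, PySem.Set.update_eq_append_filter ..⟩
      simp only [hadd, hr]
      congr 1
      have hdrop1 : ((seen ++ [x]) ++ r).drop seen.length = [x] ++ r := by
        rw [List.append_assoc, List.drop_left]
      have hdrop2 : ((seen ++ [x]) ++ r).drop (seen ++ [x]).length = r := List.drop_left
      rw [hdrop2, hdrop1, List.filter_append]
      by_cases hcx : cond x = true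
      · simp [hcx]
      · simp [hcx]

-- A's loop is a filter over the counter's keys
lemma solution_eq_filter (arr brr crr : List Int) :
    solution arr brr crr = (PySem.Dict.counter arr).keys.filter (fun a =>
      decide ((PySem.Dict.counter brr).get? a = none ∨ (PySem.Dict.counter crr).get? a = none ∨
        ((PySem.Dict.counter brr).get? a).getD 0 < ((PySem.Dict.counter arr).get? a).getD 0 ∨
        ((PySem.Dict.counter crr).get? a).getD 0 < ((PySem.Dict.counter arr).get? a).getD 0)) := by
  unfold solution
  simp only []
  rw [show (fun (solutionSet : List Int) a =>
      if (PySem.Dict.counter brr).get? a = none then solutionSet ++ [a]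
      else if (PySem.Dict.counter crr).get? a = none then solutionSet ++ [a]
      else if ((PySem.Dict.counter brr).get? a).getD 0 < ((PySem.Dict.counter arr).get? a).getD 0 then solutionSet ++ [a]
      else if ((PySem.Dict.counter crr).get? a).getD 0 < ((PySem.Dict.counter arr).get? a).getD 0 then solutionSet ++ [a]
      else solutionSet)
    = (fun (solutionSet : List Int) a =>
      if ((PySem.Dict.counter brr).get? a = none ∨ (PySem.Dict.counter crr).get? a = none ∨
          ((PySem.Dict.counter brr).get? a).getD 0 < ((PySem.Dict.counter arr).get? a).getD 0 ∨
          ((PySem.Dict.counter crr).get? a).getD 0 < ((PySem.Dict.counter arr).get? a).getD 0)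
        then solutionSet ++ [a] else solutionSet) from by
      funext s a; split_ifs <;> tauto]
  rw [PySem.List.foldl_append_ite_eq_filter]
  rw [List.nil_append]

-- ===== VERDICT (by name: the statement is the Claim_ definition above) =====
theorem solution_spec : Claim_equal_solution := by
  intro arr brr crr _
  unfold Spec_solution
  rw [solution_eq_filter]
  unfold solution_alt
  simp only []
  rw [foldl_seen_filter]
  simp only [List.nil_append]
  have hupd : PySem.Set.update (PySem.Set.empty : PySem.Set Int) arr = PySem.Set.ofList arr := by
    simp [PySem.Set.update, PySem.Set.ofList_eq_foldl, PySem.Set.empty]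
  rw [hupd]
  simp only [PySem.Set.empty, List.length_nil, List.drop_zero]
  rw [PySem.Dict.keys_counter]
  apply List.filter_congr
  intro a ha
  have hmemA : a ∈ arr := by simpa [PySem.Set.mem_ofList] using ha
  rw [pvOccurrences_sorted, pvOccurrences_sorted, pvOccurrences_sorted]
  simp only [← PySem.Dict.getD_eq_get?_getD, PySem.Dict.getD_counter,
    PySem.Dict.get?_eq_none_iff_not_mem_keys, PySem.Dict.keys_counter, PySem.Set.mem_ofList]
  have hca : 0 < arr.count a := List.count_pos_iff.mpr hmemA
  have hb : (a ∈ brr) ↔ 0 < brr.count a := List.count_pos_iff.symm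
  have hc : (a ∈ crr) ↔ 0 < crr.count a := List.count_pos_iff.symm
  rw [Bool.eq_iff_iff]
  simp only [decide_eq_true_eq, Bool.or_eq_true, hb, hc]
  omega
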